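-- pv_equiv track=rewrite | github.com/himanalot/talunt-mcp | academic_cli.py | _best_email
-- ===== SOURCE A (Python) =====
-- UC_DOMAINS = {
--     "ucb": "berkeley.edu", "ucla": "ucla.edu", "ucsd": "ucsd.edu",
--     "ucsf": "ucsf.edu", "ucdavis": "ucdavis.edu", "uci": "uci.edu",
--     "ucsb": "ucsb.edu", "ucsc": "ucsc.edu", "ucr": "ucr.edu", "ucm": "ucmerced.edu",
-- }
--
-- def _alnum_lower(s: str) -> str:
--     """lowercase + strip everything except [a-z0-9]. Handles hyphenated names
--     ('Coleman-Derr'), unicode hyphens ('‐'), apostrophes ('O'Brien'), accents."""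
--     import unicodedata
--     s = unicodedata.normalize("NFKD", s)
--     return "".join(ch for ch in s.lower() if ch.isalnum() and ord(ch) < 128)
--
-- def _best_email(emails: list[str], uc_slug: str, author_name: str = "") -> str | None:
--     """Pick the most likely author email.
--
--     Priority:
--       1. Institution domain + last-name token in local-part (e.g. 'eisen@berkeley.edu')
--       2. Any domain + last-name token in local-part (gmail, subdomain, moved institution)
--       3. Institution domain match only (risky — could be co-author at same school)
--       4. Any UC-system domain
--       5. First email
--
--     Last-name matching is normalized: hyphens/accents/apostrophes are stripped from
--     both the last name and the email local-part before comparing, so 'Coleman-Derr'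
--     matches 'colemanderr@...', 'O'Brien' matches 'obrien@...', etc."""
--     if not emails:
--         return None
--     dom = UC_DOMAINS.get(uc_slug, "").lower()
--     last_raw = author_name.split()[-1].rstrip(".") if author_name else ""
--     last_norm = _alnum_lower(last_raw)
--
--     def local_has_last(e):
--         if not last_norm or len(last_norm) < 4:
--             return False
--         local_norm = _alnum_lower(e.split("@", 1)[0])
--         return last_norm in local_norm
--
--     # 1. inst domain + last name match
--     for e in emails:
--         if dom and e.endswith("@" + dom) and local_has_last(e):
--             return e
--     # 2. any domain + last name match
--     for e in emails:
--         if local_has_last(e):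
--             return e
--     # 3. institution domain only
--     for e in emails:
--         if dom and e.endswith("@" + dom):
--             return e
--     # 4. any UC-system domain
--     for e in emails:
--         if any(e.endswith("@" + d) for d in UC_DOMAINS.values()):
--             return e
--     # 5. first
--     return emails[0]
-- ===== SOURCE B (Python) =====
-- UC_DOMAINS = {
--     "ucb": "berkeley.edu", "ucla": "ucla.edu", "ucsd": "ucsd.edu",
--     "ucsf": "ucsf.edu", "ucdavis": "ucdavis.edu", "uci": "uci.edu",
--     "ucsb": "ucsb.edu", "ucsc": "ucsc.edu", "ucr": "ucr.edu", "ucm": "ucmerced.edu",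
-- }
--
-- def _norm(s: str) -> str:
--     import unicodedata
--     s = unicodedata.normalize("NFKD", s)
--     return "".join(ch for ch in s.lower() if ch.isalnum() and ord(ch) < 128)
--
-- def _best_email(emails, uc_slug, author_name=""):
--     """Single pass: score each email by the best (smallest) priority tier it
--     qualifies for; keep the first email attaining the overall smallest tier."""
--     if not emails:
--         return None
--     dom = UC_DOMAINS.get(uc_slug, "").lower()
--     tokens = author_name.split()
--     last = _norm(tokens[-1]) if tokens else ""
--     use_last = len(last) >= 4
--     best_tier, best = 5, emails[0]
--     for e in emails:
--         inst = bool(dom) and e.endswith("@" + dom)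
--         hit = use_last and last in _norm(e.split("@", 1)[0])
--         tier = (1 if inst and hit else
--                 2 if hit else
--                 3 if inst else
--                 4 if any(e.endswith("@" + d) for d in UC_DOMAINS.values()) else
--                 5)
--         if tier < best_tier:
--             best_tier, best = tier, e
--     return best
-- ===== Notes on version B (the rewrite author's own statement) =====
-- stated objective: alternative
-- what changed: Replaces A's four sequential priority scans over the email list by a single pass that scores each email with its minimum qualifying tier (1-5) and keeps the first email attaining the smallest tier, dropping the redundant rstrip('.') that the alnum filter subsumes.
-- crash fix: On a non-empty author_name consisting only of whitespace, A raises IndexError (split()[-1] on an empty token list) while B treats it as no last name and returns the normal priority result. — e.g. on _best_email(["x@y.org"], "ucb", " "): A raises IndexError, B returns some "x@y.org"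
import Mathlib
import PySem

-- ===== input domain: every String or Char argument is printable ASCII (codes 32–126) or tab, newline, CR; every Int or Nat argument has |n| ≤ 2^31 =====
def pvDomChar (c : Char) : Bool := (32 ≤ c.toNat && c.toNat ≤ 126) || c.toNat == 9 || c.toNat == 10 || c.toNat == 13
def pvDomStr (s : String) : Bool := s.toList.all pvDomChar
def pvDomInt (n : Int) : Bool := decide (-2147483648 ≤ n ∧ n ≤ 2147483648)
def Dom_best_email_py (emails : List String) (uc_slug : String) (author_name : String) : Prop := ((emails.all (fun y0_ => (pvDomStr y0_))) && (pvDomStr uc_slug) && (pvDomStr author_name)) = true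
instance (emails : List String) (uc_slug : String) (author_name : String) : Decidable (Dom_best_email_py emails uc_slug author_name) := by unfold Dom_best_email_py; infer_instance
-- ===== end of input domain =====

-- B replaces A's four sequential priority scans by one pass keeping the first email of minimum tier (objective: alternative, same cost class).

-- module-level constant UC_DOMAINS
def ucDomains : PySem.Dict String String := PySem.Dict.mk
  [("ucb","berkeley.edu"), ("ucla","ucla.edu"), ("ucsd","ucsd.edu"),
   ("ucsf","ucsf.edu"), ("ucdavis","ucdavis.edu"), ("uci","uci.edu"),
   ("ucsb","ucsb.edu"), ("ucsc","ucsc.edu"), ("ucr","ucr.edu"), ("ucm","ucmerced.edu")]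

-- ===== PORT A =====
-- _alnum_lower: NFKD normalization is the identity on the ASCII input domain (Dom), so the
-- port is lower + keep alnum (<128); exact on Dom.
def alnumLower (s : String) : String :=
  String.ofList (((PySem.Str.lower s).toList).filter
    (fun c => PySem.Chars.isalnum c && decide (c.toNat < 128)))

-- s.rstrip(".") ported by hand on List Char (drop '.' from the right); exact.
def rstripDot (s : String) : String :=
  String.ofList ((s.toList.reverse.dropWhile (fun c => c == '.')).reverse)

-- e.endswith("@" + d): the concatenation "@" + d done on List Char (String.append is kernel-opaque); exact.
def endsAt (e d : String) : Bool := PySem.Chars.endswith e.toList ('@' :: d.toList)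

-- e.split("@", 1)[0]; the split list is never empty, so [0] never raises.
def localPart (e : String) : String :=
  (((PySem.Str.splitMax? e "@" 1).getD []).headD "")

-- local_has_last (closure over last_norm)
def localHasLast (lastNorm : String) (e : String) : Bool :=
  if lastNorm = "" ∨ PySem.Str.len lastNorm < 4 then false
  else PySem.Str.isIn lastNorm (alnumLower (localPart e))

def best_email_py (emails : List String) (uc_slug : String) (author_name : String) : Option String :=
  match emails with
  | [] => none
  | e0 :: _ =>
    let dom := PySem.Str.lower (ucDomains.getD uc_slug "")
    -- author_name.split()[-1] raises IndexError when the token list is empty (excluded by Pre_);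
    -- the none branch below is that exception.
    match (if author_name ≠ "" then
             (PySem.List.pyGet? (PySem.Str.split₀ author_name) (-1)).map rstripDot
           else some "") with
    | none => none
    | some lastRaw =>
      let lastNorm := alnumLower lastRaw
      match emails.find? (fun e => (dom ≠ "" && endsAt e dom) && localHasLast lastNorm e) with
      | some e => some e
      | none =>
      match emails.find? (fun e => localHasLast lastNorm e) with
      | some e => some e
      | none =>
      match emails.find? (fun e => dom ≠ "" && endsAt e dom) with
      | some e => some e
      | none =>
      match emails.find? (fun e => ucDomains.values.any (fun d => endsAt e d)) with
      | some e => some e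
      | none => some e0

-- ===== PORT B =====
-- _norm (same normalization helper, in Source B)
def normB (s : String) : String :=
  String.ofList (((PySem.Str.lower s).toList).filter
    (fun c => PySem.Chars.isalnum c && decide (c.toNat < 128)))

def localPartB (e : String) : String :=
  (((PySem.Str.splitMax? e "@" 1).getD []).headD "")

def best_email_py_alt (emails : List String) (uc_slug : String) (author_name : String) : Option String :=
  match emails with
  | [] => none
  | e0 :: _ =>
    let dom := PySem.Str.lower (ucDomains.getD uc_slug "")
    let tokens := PySem.Str.split₀ author_name
    let last := match tokens.getLast? with
                | some t => normB t
                | none => ""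
    let useLast := decide (4 ≤ PySem.Str.len last)
    let r := emails.foldl (fun (acc : Nat × String) e =>
        let inst := dom ≠ "" && endsAt e dom
        let hit := useLast && PySem.Str.isIn last (normB (localPartB e))
        let tier : Nat :=
          if inst && hit then 1 else if hit then 2 else if inst then 3
          else if ucDomains.values.any (fun d => endsAt e d) then 4 else 5
        if tier < acc.1 then (tier, e) else acc) (5, e0)
    some r.2

-- ===== PRECONDITION & SPEC =====
-- Pre_ excludes exactly the inputs where A raises IndexError: a non-empty author_name
-- made only of whitespace (split() yields no tokens, so [-1] fails).
def Pre_best_email_py (emails : List String) (uc_slug : String) (author_name : String) : Prop :=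
  author_name = "" ∨ PySem.Str.split₀ author_name ≠ []
instance (emails : List String) (uc_slug : String) (author_name : String) : Decidable (Pre_best_email_py emails uc_slug author_name) := by unfold Pre_best_email_py; infer_instance

def pvWitness_best_email_py : List String × String × String :=
  (["eisen@berkeley.edu", "smith@gmail.com"], "ucb", "Jonathan Eisen")

-- On a non-empty all-whitespace author_name A raises IndexError; B returns the normal priority result.
def Raises_best_email_py (emails : List String) (uc_slug : String) (author_name : String) : Prop :=
  author_name ≠ "" ∧ PySem.Str.split₀ author_name = []
instance (emails : List String) (uc_slug : String) (author_name : String) : Decidable (Raises_best_email_py emails uc_slug author_name) := by unfold Raises_best_email_py; infer_instance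
def pvRaiseWitness_best_email_py : List String × String × String := (["x@y.org"], "ucb", " ")
def pvRaiseWitnessOut_best_email_py : Option String := some "x@y.org"

def Spec_best_email_py (emails : List String) (uc_slug : String) (author_name : String) (out : Option String) : Prop := out = best_email_py_alt emails uc_slug author_name
instance (emails : List String) (uc_slug : String) (author_name : String) (out : Option String) : Decidable (Spec_best_email_py emails uc_slug author_name out) := by unfold Spec_best_email_py; infer_instance

-- ===== CLAIM (what is proved, stated in full; the proofs are below) =====
def Claim_equal_best_email_py : Prop := ∀ (emails : List String) (uc_slug : String) (author_name : String), Dom_best_email_py emails uc_slug author_name → Pre_best_email_py emails uc_slug author_name → Spec_best_email_py emails uc_slug author_name (best_email_py emails uc_slug author_name)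

def Claim_raises_best_email_py : Prop := (∀ (emails : List String) (uc_slug : String) (author_name : String), Dom_best_email_py emails uc_slug author_name → Raises_best_email_py emails uc_slug author_name → ¬ Pre_best_email_py emails uc_slug author_name) ∧ (Dom_best_email_py (pvRaiseWitness_best_email_py.1) (pvRaiseWitness_best_email_py.2.1) (pvRaiseWitness_best_email_py.2.2) ∧ Raises_best_email_py (pvRaiseWitness_best_email_py.1) (pvRaiseWitness_best_email_py.2.1) (pvRaiseWitness_best_email_py.2.2) ∧ best_email_py_alt (pvRaiseWitness_best_email_py.1) (pvRaiseWitness_best_email_py.2.1) (pvRaiseWitness_best_email_py.2.2) = pvRaiseWitnessOut_best_email_py)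

-- ===== LEMMAS AND PROOFS =====

-- priority conditions, indexed 1..4 (0 and ≥5 are the always-false padding)
def condIdx (q1 q2 q3 q4 : String → Bool) : Nat → String → Bool
  | 1 => q1
  | 2 => q2
  | 3 => q3
  | 4 => q4
  | _ => fun _ => false

-- A's scan chain, truncated to conditions of index < j
def chain (c : Nat → String → Bool) : Nat → List String → Option String
  | 0, _ => none
  | j+1, l => (chain c j l).orElse (fun _ => l.find? (c j))

theorem chain_nil (c : Nat → String → Bool) (j : Nat) : chain c j [] = none := by
  induction j with
  | zero => rfl
  | succ j ih => simp [chain, ih]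

theorem chain_cons_of_false (c : Nat → String → Bool) (e : String) (l : List String) (i : Nat)
    (h : ∀ j, j < i → c j e = false) : chain c i (e :: l) = chain c i l := by
  induction i with
  | zero => rfl
  | succ j ih =>
    simp only [chain]
    rw [ih (fun k hk => h k (Nat.lt_succ_of_lt hk)),
        List.find?_cons_of_neg (by simp [h j (Nat.lt_succ_self j)])]

theorem chain_mono (c : Nat → String → Bool) (l : List String) (i j : Nat) (x : String)
    (hij : i ≤ j) (h : chain c i l = some x) : chain c j l = some x := by
  induction j, hij using Nat.le_induction with
  | base => exact h
  | succ j _ ih => simp [chain, ih]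

theorem chain_cons_of_true (c : Nat → String → Bool) (e : String) (l : List String) (i : Nat)
    (hi : c i e = true) (h : ∀ j, j < i → c j e = false) :
    chain c (i+1) (e :: l) = some ((chain c i l).getD e) := by
  simp only [chain]
  rw [chain_cons_of_false c e l i h, List.find?_cons_of_pos hi]
  cases chain c i l <;> rfl

-- the one-pass minimum-tier fold computes A's scan chain
theorem fold_eq_chain (c : Nat → String → Bool) (t : String → Nat)
    (hT1 : ∀ e j, j < t e → c j e = false)
    (hT2 : ∀ e, t e < 5 → c (t e) e = true)
    (hT3 : ∀ e, t e ≤ 5) :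
    ∀ (l : List String) (bt : Nat) (b : String), bt ≤ 5 →
    (l.foldl (fun acc e => if t e < acc.1 then (t e, e) else acc) (bt, b)).2
      = (chain c bt l).getD b := by
  intro l
  induction l with
  | nil => intro bt b _; simp [chain_nil]
  | cons e l ih =>
    intro bt b hbt
    simp only [List.foldl_cons]
    by_cases h : t e < bt
    · rw [if_pos h]
      rw [ih (t e) e (hT3 e)]
      have h5 : t e < 5 := by omega
      have hc : chain c (t e + 1) (e :: l) = some ((chain c (t e) l).getD e) :=
        chain_cons_of_true c e l (t e) (hT2 e h5) (fun j hj => hT1 e j hj)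
      rw [chain_mono c (e :: l) (t e + 1) bt _ (by omega) hc]
      rfl
    · rw [if_neg h]
      rw [ih bt b hbt]
      rw [chain_cons_of_false c e l bt (fun j hj => hT1 e j (by omega))]

-- A's nested find? matches are the getD of the 4-step chain
theorem matches_eq_chain (q1 q2 q3 q4 : String → Bool) (l : List String) (e0 : String) :
    (match l.find? q1 with
     | some e => some e
     | none =>
       match l.find? q2 with
       | some e => some e
       | none =>
         match l.find? q3 with
         | some e => some e
         | none =>
           match l.find? q4 with
           | some e => some e
           | none => some e0) = some ((chain (condIdx q1 q2 q3 q4) 5 l).getD e0) := by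
  have hch : chain (condIdx q1 q2 q3 q4) 5 l
      = ((((none.orElse (fun _ => l.find? (fun _ => false))).orElse
          (fun _ => l.find? q1)).orElse (fun _ => l.find? q2)).orElse
          (fun _ => l.find? q3)).orElse (fun _ => l.find? q4) := rfl
  rw [hch]
  have hf : l.find? (fun _ => false) = none := by simp
  cases l.find? q1 <;> cases l.find? q2 <;> cases l.find? q3 <;> cases l.find? q4 <;>
    simp [Option.orElse, hf]

-- B's guarded last-name test equals A's local_has_last closure
theorem hit_eq (last e : String) :
    (decide (4 ≤ PySem.Str.len last) && PySem.Str.isIn last (normB (localPartB e)))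
      = localHasLast last e := by
  unfold localHasLast
  by_cases h : 4 ≤ PySem.Str.len last
  · have hne : ¬ (last = "" ∨ PySem.Str.len last < 4) := by
      rintro (rfl | hlt)
      · revert h; decide
      · omega
    rw [if_neg hne]
    simp only [decide_eq_true h, Bool.true_and]
    unfold normB localPartB alnumLower localPart
    rfl
  · rw [if_pos (Or.inr (by omega)), decide_eq_false h, Bool.false_and]

-- dropping trailing dots does not change the alnum-filtered characters
theorem filter_lower_rstrip (p : Char → Bool) (hp : p (PySem.Chars.lowerChar '.') = false)
    (l : List Char) :
    List.filter p (PySem.Chars.lower ((l.reverse.dropWhile (fun c => c == '.')).reverse))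
      = List.filter p (PySem.Chars.lower l) := by
  induction l using List.reverseRecOn with
  | nil => rfl
  | append_singleton l x ih =>
    rw [List.reverse_append, List.reverse_singleton, List.singleton_append]
    by_cases hx : x = '.'
    · subst hx
      rw [List.dropWhile_cons_of_pos (by simp)]
      rw [ih]
      simp [PySem.Chars.lower, List.filter_append, hp]
    · rw [List.dropWhile_cons_of_neg (by simp [hx])]
      simp [PySem.Chars.lower, List.filter_append]

-- the alnum filter ignores the trailing dots rstrip(".") removes
theorem alnumLower_rstripDot (s : String) : alnumLower (rstripDot s) = alnumLower s := by
  unfold alnumLower rstripDot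
  simp only [PySem.Str.toList_lower, String.toList_ofList]
  congr 1
  exact filter_lower_rstrip _ (by decide) s.toList

-- the two normalization helpers are the same function
theorem alnumLower_eq_normB (s : String) : alnumLower s = normB s := rfl

-- the shared tail of the two ports, generalized over the per-email tests
theorem core_gen (e0 : String) (rest : List String) (inst hitA hitB ucb : String → Bool)
    (hh : ∀ e, hitB e = hitA e) :
    (match (e0::rest).find? (fun e => inst e && hitA e) with
     | some e => some e
     | none =>
     match (e0::rest).find? (fun e => hitA e) with
     | some e => some e
     | none =>
     match (e0::rest).find? (fun e => inst e) with
     | some e => some e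
     | none =>
     match (e0::rest).find? (fun e => ucb e) with
     | some e => some e
     | none => some e0)
    = some (((e0::rest).foldl (fun (acc : Nat × String) e =>
        if (if inst e && hitB e then 1 else if hitB e then 2 else if inst e then 3
            else if ucb e then 4 else 5 : Nat) < acc.1
        then ((if inst e && hitB e then 1 else if hitB e then 2 else if inst e then 3
            else if ucb e then 4 else 5 : Nat), e) else acc) (5, e0)).2) := by
  have hfold : ((e0::rest).foldl (fun (acc : Nat × String) e =>
        if (if inst e && hitB e then 1 else if hitB e then 2 else if inst e then 3
            else if ucb e then 4 else 5 : Nat) < acc.1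
        then ((if inst e && hitB e then 1 else if hitB e then 2 else if inst e then 3
            else if ucb e then 4 else 5 : Nat), e) else acc) (5, e0))
      = ((e0::rest).foldl (fun (acc : Nat × String) e =>
          if (fun e => if inst e && hitA e then 1 else if hitA e then 2 else if inst e then 3
              else if ucb e then 4 else 5 : String → Nat) e < acc.1
          then ((fun e => if inst e && hitA e then 1 else if hitA e then 2 else if inst e then 3
              else if ucb e then 4 else 5 : String → Nat) e, e) else acc) (5, e0)) := by
    congr 1
    funext acc e
    simp only [hh]
  rw [hfold]
  rw [fold_eq_chain (condIdx (fun e => inst e && hitA e) (fun e => hitA e)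
        (fun e => inst e) (fun e => ucb e))
      (fun e => if inst e && hitA e then 1 else if hitA e then 2 else if inst e then 3
          else if ucb e then 4 else 5)
      (fun e j hj => by
        simp only at hj
        split_ifs at hj <;> interval_cases j <;> simp_all [condIdx])
      (fun e hj => by
        simp only at hj ⊢
        split_ifs <;> simp_all [condIdx])
      (fun e => by simp only; split_ifs <;> omega)
      (e0 :: rest) 5 e0 (le_refl 5)]
  exact matches_eq_chain _ _ _ _ (e0 :: rest) e0

-- ===== VERDICT (by name: the statement is the Claim_ definition above) =====
set_option maxHeartbeats 1000000 in
theorem best_email_py_spec : Claim_equal_best_email_py := by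
  intro emails uc_slug author_name _ hpre
  unfold Spec_best_email_py best_email_py best_email_py_alt
  cases emails with
  | nil => rfl
  | cons e0 rest =>
    have hsplit0 : PySem.Str.split₀ "" = [] := rfl
    simp only []
    rcases hg : (PySem.Str.split₀ author_name).getLast? with _ | tok
    · have ha : author_name = "" := by
        rcases hpre with h | h
        · exact h
        · exact absurd (List.getLast?_eq_none_iff.mp hg) h
      subst ha
      rw [if_neg (by simp)]
      simp only []
      rw [show alnumLower "" = "" from by decide]
      exact core_gen e0 rest _ _ _ _ (fun e => hit_eq "" e)
    · have ha : author_name ≠ "" := by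
        intro h
        subst h
        rw [hsplit0] at hg
        simp at hg
      rw [if_pos ha, PySem.List.pyGet?_neg_one, hg]
      simp only [Option.map_some]
      rw [alnumLower_rstripDot tok, alnumLower_eq_normB tok]
      exact core_gen e0 rest _ _ _ _ (fun e => hit_eq (normB tok) e)

@[simp]
theorem best_email_py_raises : Claim_raises_best_email_py := by
  unfold Claim_raises_best_email_py
  constructor
  · intro emails uc_slug author_name _ hr hp
    rcases hr with ⟨h1, h2⟩
    rcases hp with h | h
    · exact h1 h
    · exact h h2
  · exact ⟨by decide, by decide, by decide⟩
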